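-- pv_equiv track=rewrite | github.com/mdbruffey/adventofcode | 2024/Day-05/solve.py | part1
-- ===== SOURCE A (Python) =====
-- def is_ordered(update, rules):
--     for i,num in enumerate(update):
--         if num not in rules:
--             continue
--         pres = rules[num]
--         for pre in pres:
--             if pre in update[i:]:
--                 return False
--     return True
--
-- def part1(updates, rules):
--     val = 0
--     broken = []
--     for update in updates:
--         if is_ordered(update, rules):
--             val += update[len(update)//2]
--         else:
--             broken.append(update)
--     return val, broken #decided to send the list of broken updates back since part 2 only needs those
-- ===== SOURCE B (Python) =====
-- def part1(updates, rules):
--     def ok(update):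
--         later = set()
--         for num in reversed(update):
--             later.add(num)
--             if any(p in later for p in rules.get(num, ())):
--                 return False
--         return True
--     broken = [u for u in updates if not ok(u)]
--     total = sum(u[len(u) // 2] for u in updates if ok(u))
--     return total, broken
-- ===== Notes on version B (the rewrite author's own statement) =====
-- stated objective: alternative
-- what changed: Replaces A's forward scan with per-element tail-slice membership tests by one right-to-left pass per update that accumulates a set of already-seen (later) pages and checks each element's rules against it, and splits the outer accumulator loop into two staged comprehensions (broken list, then the sum of middles).
import Mathlib
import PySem

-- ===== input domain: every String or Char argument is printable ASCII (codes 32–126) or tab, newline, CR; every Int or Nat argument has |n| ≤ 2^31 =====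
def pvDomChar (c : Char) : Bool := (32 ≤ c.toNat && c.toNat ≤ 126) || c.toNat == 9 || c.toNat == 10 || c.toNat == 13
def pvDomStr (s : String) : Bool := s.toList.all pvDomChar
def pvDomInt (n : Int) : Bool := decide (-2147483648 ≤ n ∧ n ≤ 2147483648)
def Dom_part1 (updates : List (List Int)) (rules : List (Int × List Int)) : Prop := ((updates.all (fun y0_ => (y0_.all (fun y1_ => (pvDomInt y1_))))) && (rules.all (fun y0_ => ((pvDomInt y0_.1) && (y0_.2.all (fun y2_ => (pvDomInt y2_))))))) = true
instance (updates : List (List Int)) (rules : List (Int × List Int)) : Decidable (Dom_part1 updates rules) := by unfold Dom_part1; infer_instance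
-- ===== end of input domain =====

-- B replaces A's forward scan with per-element tail-slice membership tests by a single
-- right-to-left pass per update that accumulates a 'later' set and checks each rule against it,
-- and splits the outer loop into two staged comprehensions (broken list, then the sum); objective: alternative.

-- ===== PORT A =====
-- is_ordered: the two early-return loops become `.all` over the same enumerate / rule lists.
def isOrdered (update : List Int) (rules : List (Int × List Int)) : Bool :=
  (PySem.List.enumerate update).all (fun p =>
    match (PySem.Dict.mk rules).get? p.2 with
    | none => true            -- `if num not in rules: continue`
    | some pres => pres.all (fun pre =>
        !(PySem.List.slice update (some p.1) none).contains pre))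

def part1 (updates : List (List Int)) (rules : List (Int × List Int)) : Int × List (List Int) :=
  updates.foldl (fun acc update =>
    if isOrdered update rules then
      -- update[len(update)//2]: pyGetD is exact under Pre_part1 (every update nonempty)
      (acc.1 + PySem.List.pyGetD update (PySem.Int.floordiv (PySem.List.len update) 2) 0, acc.2)
    else
      (acc.1, acc.2 ++ [update])) (0, [])

-- ===== PORT B =====
-- backward pass: `later` accumulates the elements seen so far from the right; the Bool in the
-- state encodes Python's early `return False` (once false, the fold passes the state through).
def okStep (rules : List (Int × List Int)) (st : PySem.Set Int × Bool) (num : Int) : PySem.Set Int × Bool :=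
  if st.2 then
    let later := PySem.Set.add st.1 num
    (later, !((PySem.Dict.mk rules).getD num []).any (fun p => PySem.Set.contains later p))
  else st

def okB (update : List Int) (rules : List (Int × List Int)) : Bool :=
  (update.reverse.foldl (okStep rules) (PySem.Set.ofList [], true)).2

def part1_alt (updates : List (List Int)) (rules : List (Int × List Int)) : Int × List (List Int) :=
  let broken := updates.filter (fun u => !okB u rules)
  let total := (updates.filter (fun u => okB u rules)).foldl
      (fun s u => s + PySem.List.pyGetD u (PySem.Int.floordiv (PySem.List.len u) 2) 0) 0
  (total, broken)

-- ===== PRECONDITION & SPEC =====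
-- Pre_ excludes inputs containing an empty update: there A (and B) raise IndexError on update[len(update)//2].
def Pre_part1 (updates : List (List Int)) (rules : List (Int × List Int)) : Prop :=
  ∀ u ∈ updates, u ≠ []
instance (updates : List (List Int)) (rules : List (Int × List Int)) : Decidable (Pre_part1 updates rules) := by unfold Pre_part1; infer_instance

def pvWitness_part1 : List (List Int) × (List (Int × List Int)) := ([[1, 2, 3], [2, 1]], [(2, [1])])

def Spec_part1 (updates : List (List Int)) (rules : List (Int × List Int)) (out : Int × List (List Int)) : Prop := out = part1_alt updates rules
instance (updates : List (List Int)) (rules : List (Int × List Int)) (out : Int × List (List Int)) : Decidable (Spec_part1 updates rules out) := by unfold Spec_part1; infer_instance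

-- ===== CLAIM (what is proved, stated in full; the proofs are below) =====
def Claim_equal_part1 : Prop := ∀ (updates : List (List Int)) (rules : List (Int × List Int)), Dom_part1 updates rules → Pre_part1 updates rules → Spec_part1 updates rules (part1 updates rules)

-- ===== LEMMAS AND PROOFS =====

-- A's check, characterised positionally: no required predecessor of update[k] occurs in update[k:]
lemma isOrdered_iff (update : List Int) (rules : List (Int × List Int)) :
    isOrdered update rules = true ↔
    ∀ k, (h : k < update.length) →
      ∀ pre ∈ (PySem.Dict.mk rules).getD update[k] [], pre ∉ update.drop k := by
  simp only [isOrdered, List.all_eq_true]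
  constructor
  · intro h k hk pre hpre hmem
    have hp := h (((0:Int) + (k:Int)), update[k])
      ((PySem.List.mem_enumerate_iff _ _ _).mpr ⟨k, hk, rfl⟩)
    rw [PySem.Dict.getD_eq_get?_getD] at hpre
    cases hg : (PySem.Dict.mk rules).get? update[k] with
    | none => rw [hg] at hpre; simp at hpre
    | some pres =>
        rw [hg] at hpre
        simp only [Option.getD_some] at hpre
        simp only [hg, List.all_eq_true] at hp
        have := hp pre hpre
        have hs : PySem.List.slice update (some ((0:Int) + (k:Int))) none = update.drop k := by
          norm_num [PySem.List.slice_from_natCast]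
        rw [hs] at this
        simp [List.contains_eq_mem, hmem] at this
  · intro h p hp
    obtain ⟨k, hk, rfl⟩ := (PySem.List.mem_enumerate_iff _ _ _).mp hp
    cases hg : (PySem.Dict.mk rules).get? update[k] with
    | none => simp
    | some pres =>
        simp only [List.all_eq_true]
        intro pre hpre
        have hmem := h k hk pre (by
          rw [PySem.Dict.getD_eq_get?_getD, hg]; exact hpre)
        have hs : PySem.List.slice update (some ((0:Int) + (k:Int))) none = update.drop k := by
          norm_num [PySem.List.slice_from_natCast]
        simp [List.contains_eq_mem, hmem]

-- once the flag is false the fold passes the state through (Python's early return)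
lemma flag_false (rules : List (Int × List Int)) (xs : List Int) (st : PySem.Set Int × Bool)
    (h : st.2 = false) : xs.foldl (okStep rules) st = st := by
  induction xs generalizing st with
  | nil => rfl
  | cons x xs ih =>
      have hst : okStep rules st x = st := by simp [okStep, h]
      rw [List.foldl_cons, hst, ih st h]

-- the backward fold checks exactly: no required predecessor of xs[k] is in xs[k:] or in S
lemma okB_rev (rules : List (Int × List Int)) (xs : List Int) (S : PySem.Set Int) :
    ((xs.reverse.foldl (okStep rules) (S, true)).2 = true) ↔
    (∀ k, (h : k < xs.length) →
      ∀ pre ∈ (PySem.Dict.mk rules).getD xs[k] [], pre ∉ xs.drop k ∧ pre ∉ S) := by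
  induction xs using List.reverseRecOn generalizing S with
  | nil => simp
  | append_singleton ys x ih =>
      rw [List.reverse_append]
      simp only [List.reverse_cons, List.reverse_nil, List.nil_append, List.singleton_append,
        List.foldl_cons]
      have hstep : okStep rules (S, true) x =
          (PySem.Set.add S x,
           !((PySem.Dict.mk rules).getD x []).any (fun p => PySem.Set.contains (PySem.Set.add S x) p)) := by
        simp [okStep]
      rw [hstep]
      by_cases hany : ((PySem.Dict.mk rules).getD x []).any
          (fun p => PySem.Set.contains (PySem.Set.add S x) p) = true
      · -- violation at the last position: both sides false
        rw [hany]
        have hfold := flag_false rules ys.reverse (PySem.Set.add S x, !true) rfl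
        rw [hfold]
        simp only [Bool.not_true]
        apply iff_of_false (by simp)
        intro hgood
        obtain ⟨pre, hpre, hc⟩ := List.any_eq_true.mp hany
        have hk : ys.length < (ys ++ [x]).length := by simp
        have hx : (ys ++ [x])[ys.length] = x := by
          simp
        have hd : (ys ++ [x]).drop ys.length = [x] := by
          rw [List.drop_append_of_le_length (le_refl _)]
          simp
        have := hgood ys.length hk pre (by rw [hx]; exact hpre)
        rw [hd] at this
        have hmem : pre ∈ PySem.Set.add S x := (PySem.Set.contains_iff _ _).mp hc
        rcases (PySem.Set.mem_add _ _ _).mp hmem with hS | hx'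
        · exact this.2 hS
        · exact this.1 (by simp [hx'])
      · rw [Bool.not_eq_true] at hany
        rw [hany]
        simp only [Bool.not_false]
        rw [ih (PySem.Set.add S x)]
        -- index-shuffling equivalence between ys with S∪{x} and ys++[x] with S
        constructor
        · intro hgood k hk pre hpre
          rcases Nat.lt_succ_iff_lt_or_eq.mp (by simpa using hk) with hlt | heq
          · have hx : (ys ++ [x])[k] = ys[k] := List.getElem_append_left hlt
            have := hgood k hlt pre (by rw [hx] at hpre; exact hpre)
            have hd : (ys ++ [x]).drop k = ys.drop k ++ [x] :=
              List.drop_append_of_le_length (Nat.le_of_lt hlt)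
            rw [hd]
            have hnadd := this.2
            rw [PySem.Set.mem_add] at hnadd
            push Not at hnadd
            constructor
            · intro hm
              rcases List.mem_append.mp hm with hm | hm
              · exact this.1 hm
              · exact hnadd.2 (by simpa using hm)
            · exact hnadd.1
          · subst heq
            have hx : (ys ++ [x])[ys.length] = x := by simp
            rw [hx] at hpre
            have hnm : pre ∉ PySem.Set.add S x := by
              intro hm
              have hc : PySem.Set.contains (PySem.Set.add S x) pre = true :=
                (PySem.Set.contains_iff _ _).mpr hm
              have hT : ((PySem.Dict.mk rules).getD x []).any
                  (fun p => PySem.Set.contains (PySem.Set.add S x) p) = true :=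
                List.any_eq_true.mpr ⟨pre, hpre, hc⟩
              rw [hany] at hT
              exact Bool.false_ne_true hT
            rw [PySem.Set.mem_add] at hnm
            push Not at hnm
            have hd : (ys ++ [x]).drop ys.length = [x] := by
              rw [List.drop_append_of_le_length (le_refl _)]; simp
            rw [hd]
            exact ⟨by simp [hnm.2], hnm.1⟩
        · intro hgood k hk pre hpre
          have hk' : k < (ys ++ [x]).length := by simp; omega
          have hx : (ys ++ [x])[k] = ys[k] := List.getElem_append_left hk
          have := hgood k hk' pre (by rw [hx]; exact hpre)
          have hd : (ys ++ [x]).drop k = ys.drop k ++ [x] :=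
            List.drop_append_of_le_length (Nat.le_of_lt hk)
          rw [hd] at this
          refine ⟨fun hm => this.1 (List.mem_append_left _ hm), ?_⟩
          rw [PySem.Set.mem_add]
          rintro (hS | rfl)
          · exact this.2 hS
          · exact this.1 (List.mem_append_right _ (by simp))

lemma ok_eq (update : List Int) (rules : List (Int × List Int)) :
    isOrdered update rules = okB update rules := by
  apply Bool.coe_iff_coe.mp
  rw [isOrdered_iff]
  unfold okB
  rw [okB_rev]
  constructor
  · intro h k hk pre hpre
    exact ⟨h k hk pre hpre, by simp [PySem.Set.ofList]⟩
  · intro h k hk pre hpre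
    exact (h k hk pre hpre).1

lemma foldl_shift (f : List Int → Int) (xs : List (List Int)) (s : Int) :
    xs.foldl (fun a u => a + f u) s = s + xs.foldl (fun a u => a + f u) 0 := by
  induction xs generalizing s with
  | nil => simp
  | cons x xs ih =>
      simp only [List.foldl_cons]
      rw [ih (s + f x), ih (0 + f x)]
      ring

-- A's single accumulator loop computed from B's two staged filters
lemma foldA_eq (rules : List (Int × List Int)) (us : List (List Int)) (acc : Int × List (List Int)) :
    us.foldl (fun acc update =>
      if isOrdered update rules then
        (acc.1 + PySem.List.pyGetD update (PySem.Int.floordiv (PySem.List.len update) 2) 0, acc.2)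
      else (acc.1, acc.2 ++ [update])) acc
    = (acc.1 + (us.filter (fun u => okB u rules)).foldl
          (fun s u => s + PySem.List.pyGetD u (PySem.Int.floordiv (PySem.List.len u) 2) 0) 0,
       acc.2 ++ us.filter (fun u => !okB u rules)) := by
  induction us generalizing acc with
  | nil => simp
  | cons u us ih =>
      rw [List.foldl_cons, ok_eq]
      by_cases h : okB u rules = true
      · simp only [h, if_true, List.filter_cons, Bool.not_true]
        rw [ih]
        simp only [List.foldl_cons]
        rw [foldl_shift _ _ (0 + PySem.List.pyGetD u (PySem.Int.floordiv (PySem.List.len u) 2) 0)]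
        apply Prod.ext
        · simp; ring
        · simp
      · rw [Bool.not_eq_true] at h
        simp only [h, List.filter_cons, Bool.not_false]
        rw [ih]
        simp

-- ===== VERDICT (by name: the statement is the Claim_ definition above) =====
theorem part1_spec : Claim_equal_part1 := by
  intro updates rules _ _
  unfold Spec_part1 part1 part1_alt
  rw [foldA_eq]
  simp
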